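-- pv_equiv track=rewrite | github.com/cerise-at/how_many_trees | api/routes/tests.py | generate_missing_value_cases
-- ===== SOURCE A (Python) =====
-- def generate_missing_value_cases(kwargs):
--
--     """
--     Generate a list of dict copies with one value missing in every copy.
--     """
--
--     retval = []
--     for i in range(len(kwargs.keys())):
--         retval.append({**kwargs})
--
--     for i, case in enumerate(retval):
--         for j, key in enumerate(case.keys()):
--             if i == j:
--                 case[key] = None
--                 break
--     return retval
-- ===== SOURCE B (Python) =====
-- def generate_missing_value_cases(kwargs):
--     """Generate a list of dict copies with one value missing in every copy."""
--     return [{**kwargs, key: None} for key in kwargs]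
-- ===== Notes on version B (the rewrite author's own statement) =====
-- stated objective: simpler
-- what changed: B is a one-line comprehension that builds each copy directly with its key nulled ({**kwargs, key: None}), replacing A's two-phase structure of pre-building n identical copies and then a nested enumerate loop that rescans each copy's keys to find the one at matching position.
import Mathlib
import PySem

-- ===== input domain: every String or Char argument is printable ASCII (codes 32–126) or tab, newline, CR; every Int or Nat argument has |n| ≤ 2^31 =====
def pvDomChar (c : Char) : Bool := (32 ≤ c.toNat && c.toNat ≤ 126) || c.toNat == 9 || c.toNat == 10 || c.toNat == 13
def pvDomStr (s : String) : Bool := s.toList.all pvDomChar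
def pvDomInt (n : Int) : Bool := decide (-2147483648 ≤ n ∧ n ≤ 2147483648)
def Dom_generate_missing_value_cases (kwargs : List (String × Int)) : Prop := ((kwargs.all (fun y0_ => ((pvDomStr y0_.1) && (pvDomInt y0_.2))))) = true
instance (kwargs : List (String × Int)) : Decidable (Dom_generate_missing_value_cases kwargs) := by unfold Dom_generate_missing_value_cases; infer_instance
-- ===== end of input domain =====

-- B replaces A's two-phase build-then-positional-rescan with a single comprehension
-- that nulls each key directly; equivalence of the return value is proved below.

-- ===== PORT A =====
-- inner 'for j, key in enumerate(case.keys()): if i == j: case[key] = None; break'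
def pvInnerA (i : Int) (c : PySem.Dict String (Option Int)) :
    List (Int × String) → PySem.Dict String (Option Int)
  | [] => c
  | (j, k) :: rest => if i = j then c.insert k none else pvInnerA i c rest

def generate_missing_value_cases (kwargs : List (String × Int)) : List (List (String × Option Int)) :=
  let d := PySem.Dict.ofList kwargs
  -- {**kwargs} : a fresh copy, values widened to Option for the later None write
  let copy : PySem.Dict String (Option Int) := PySem.Dict.mk (d.items.map (fun p => (p.1, some p.2)))
  -- retval = []; for i in range(len(kwargs.keys())): retval.append({**kwargs})
  let retval := (PySem.List.pyRange 0 (d.keys.length : Int) 1).foldl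
      (fun acc _ => acc ++ [copy]) ([] : List (PySem.Dict String (Option Int)))
  -- for i, case in enumerate(retval): (inner loop mutates case in place)
  let retval2 := (PySem.List.enumerate retval 0).map
      (fun ic => pvInnerA ic.1 ic.2 (PySem.List.enumerate ic.2.keys 0))
  retval2.map (fun c => c.items)

-- ===== PORT B =====
def generate_missing_value_cases_alt (kwargs : List (String × Int)) : List (List (String × Option Int)) :=
  let d := PySem.Dict.ofList kwargs
  -- [{**kwargs, key: None} for key in kwargs]
  d.keys.map (fun k =>
    ((PySem.Dict.mk (d.items.map (fun p => (p.1, some p.2)))).insert k none).items)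

-- ===== PRECONDITION & SPEC =====
def Spec_generate_missing_value_cases (kwargs : List (String × Int)) (out : List (List (String × Option Int))) : Prop := out = generate_missing_value_cases_alt kwargs
instance (kwargs : List (String × Int)) (out : List (List (String × Option Int))) : Decidable (Spec_generate_missing_value_cases kwargs out) := by unfold Spec_generate_missing_value_cases; infer_instance

-- ===== CLAIM (what is proved, stated in full; the proofs are below) =====
def Claim_equal_generate_missing_value_cases : Prop := ∀ (kwargs : List (String × Int)), Dom_generate_missing_value_cases kwargs → Spec_generate_missing_value_cases kwargs (generate_missing_value_cases kwargs)

-- ===== LEMMAS AND PROOFS =====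

-- the break-at-position-i inner scan picks out exactly key number i
theorem pvInnerA_enumerate (ks : List String) (c : PySem.Dict String (Option Int))
    (n : Nat) (s : Int) (h : n < ks.length) :
    pvInnerA (s + n) c (PySem.List.enumerate ks s) = c.insert ks[n] none := by
  induction ks generalizing s n with
  | nil => simp at h
  | cons k ks ih =>
    rw [PySem.List.enumerate_cons]
    cases n with
    | zero => simp [pvInnerA]
    | succ m =>
      have hrw : s + ((m + 1 : Nat) : Int) = (s + 1) + (m : Int) := by push_cast; ring
      rw [hrw]
      have hne : (s + 1) + (m : Int) ≠ s := by omega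
      simp only [pvInnerA, if_neg hne]
      have := ih m (s + 1) (by simpa using h)
      simpa using this

-- mapping over enumerate of a replicated list is a map over range
theorem map_enumerate_replicate {β : Type} (n : Nat) (c : PySem.Dict String (Option Int))
    (s : Int) (f : Int × PySem.Dict String (Option Int) → β) :
    (PySem.List.enumerate (List.replicate n c) s).map f
      = (List.range n).map (fun (j : Nat) => f (s + (j : Int), c)) := by
  induction n generalizing s with
  | zero => simp
  | succ m ih =>
    rw [List.replicate_succ, PySem.List.enumerate_cons, List.range_succ_eq_map]
    simp only [List.map_cons, ih]
    congr 1
    · norm_num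
    · rw [List.map_map]
      apply List.map_congr_left
      intro j _
      simp only [Function.comp_apply]
      have : s + 1 + (j : Int) = s + ((j.succ : Nat) : Int) := by push_cast; ring
      rw [this]

-- indexing every position of ks through the inner scan is just mapping over ks
theorem range_map_pvInnerA (ks : List String) (c : PySem.Dict String (Option Int)) :
    (List.range ks.length).map (fun (j : Nat) => (pvInnerA (j : Int) c (PySem.List.enumerate ks 0)).items)
      = ks.map (fun k => (c.insert k none).items) := by
  apply List.ext_getElem
  · simp
  · intro j h1 h2
    simp only [List.getElem_map, List.getElem_range]
    have hj : j < ks.length := by simpa using h1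
    have := pvInnerA_enumerate ks c j 0 hj
    rw [zero_add] at this
    rw [this]

-- ===== VERDICT (by name: the statement is the Claim_ definition above) =====
theorem generate_missing_value_cases_spec : Claim_equal_generate_missing_value_cases := by
  intro kwargs _
  unfold Spec_generate_missing_value_cases generate_missing_value_cases generate_missing_value_cases_alt
  dsimp only
  set d := PySem.Dict.ofList kwargs with hd
  set copy : PySem.Dict String (Option Int) := PySem.Dict.mk (d.items.map (fun p => (p.1, some p.2))) with hcopy
  have hkeys : copy.keys = d.keys := by
    simp [hcopy, PySem.Dict.keys, Function.comp]
  have hrep : (PySem.List.pyRange 0 (d.keys.length : Int) 1).foldl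
      (fun acc _ => acc ++ [copy]) ([] : List (PySem.Dict String (Option Int)))
      = List.replicate d.keys.length copy := by
    rw [PySem.List.foldl_append_singleton_eq_map (f := fun _ => copy)]
    rw [List.map_const']
    simp [PySem.List.length_pyRange_one]
  rw [hrep]
  rw [map_enumerate_replicate d.keys.length copy 0
    (fun ic => pvInnerA ic.1 ic.2 (PySem.List.enumerate ic.2.keys 0))]
  rw [List.map_map]
  simpa [Function.comp, hkeys] using range_map_pvInnerA d.keys copy
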